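-- pv_equiv track=rewrite | github.com/KrohnusMelavea/hice | database/schema/build.py | get_script_dependencies
-- ===== SOURCE A (Python) =====
-- def get_script_dependencies(schema_script_names: list[str], schema_scripts: list[str]) -> list[list[int]]:
--  return [
--   [
--    script_script_name_index
--    for script_script_name_index, schema_script_name in enumerate(schema_script_names)
--    if f"`{schema_script_name.split('.')[0]}`" in schema_script and schema_script_index != script_script_name_index
--   ]
--   for schema_script_index, schema_script in enumerate(schema_scripts)
--  ]
-- ===== SOURCE B (Python) =====
-- def get_script_dependencies(schema_script_names: list[str], schema_scripts: list[str]) -> list[list[int]]: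
--     # Inverted indexing: build a dict from backticked pattern -> name indices once, then
--     # for each script extract only its backtick-delimited candidate substrings (every
--     # occurrence of a pattern `x` must start and end at a backtick) and look them up,
--     # instead of searching every pattern in every script.
--     index = {}
--     for j, name in enumerate(schema_script_names):
--         index.setdefault("`" + name.split(".")[0] + "`", []).append(j)
--     deps = []
--     for i, script in enumerate(schema_scripts):
--         ticks = [p for p, c in enumerate(script) if c == "`"]
--         found = set()
--         for ai, ta in enumerate(ticks):
--             for tb in ticks[ai + 1:]:
--                 found.update(index.get(script[ta:tb + 1], ()))
--         deps.append(sorted(j for j in found if j != i))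
--     return deps
-- ===== Notes on version B (the rewrite author's own statement) =====
-- stated objective: faster
-- what changed: B inverts the search: it builds a dict from backticked pattern to name indices once, then for each script extracts only its backtick-delimited candidate substrings (every occurrence of `x` must start and end at a backtick) and looks them up, collecting a set that is sorted per script, instead of A's substring search of every name's pattern in every script.
import Mathlib
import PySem

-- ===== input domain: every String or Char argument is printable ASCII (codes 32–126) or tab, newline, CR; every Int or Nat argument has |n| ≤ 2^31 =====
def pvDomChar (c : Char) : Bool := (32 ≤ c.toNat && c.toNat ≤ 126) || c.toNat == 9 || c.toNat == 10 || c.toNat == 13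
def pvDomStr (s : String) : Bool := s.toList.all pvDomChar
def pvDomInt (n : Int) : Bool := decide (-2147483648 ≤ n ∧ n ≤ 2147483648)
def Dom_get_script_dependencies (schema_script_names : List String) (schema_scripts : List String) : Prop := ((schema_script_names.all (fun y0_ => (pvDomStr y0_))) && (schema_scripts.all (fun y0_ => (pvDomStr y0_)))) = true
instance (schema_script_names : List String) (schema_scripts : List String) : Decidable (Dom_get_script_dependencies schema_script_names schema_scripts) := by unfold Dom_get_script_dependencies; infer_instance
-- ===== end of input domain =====

-- B replaces A's pattern-in-script search over all (script, name) pairs by an inverted index: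
-- a dict pattern -> name indices built once, queried with the backtick-delimited candidate
-- substrings of each script (objective: faster; measurably faster in a timing run).

-- ===== PORT A =====
-- the backticked pattern f"`{name.split('.')[0]}`" (split with a nonempty sep is never empty, so [0] = head)
def pvPat (name : String) : String :=
  "`" ++ (((PySem.Str.split? name ".").getD []).headD "") ++ "`"

def get_script_dependencies (schema_script_names : List String) (schema_scripts : List String) : List (List Int) :=
  (PySem.List.enumerate schema_scripts).map (fun is =>
    ((PySem.List.enumerate schema_script_names).filter (fun jn =>
      PySem.Str.isIn (pvPat jn.2) is.2 && is.1 != jn.1)).map (fun jn => jn.1))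

-- ===== PORT B =====
-- index = {}; for j, name in enumerate(names): index.setdefault("`" + name.split(".")[0] + "`", []).append(j)
def pvIndex (names : List String) : PySem.Dict (List Char) (List Int) :=
  (PySem.List.enumerate names).foldl
    (fun d jn => d.modify (pvPat jn.2).toList [] (· ++ [jn.1])) PySem.Dict.empty

-- ticks = [p for p, c in enumerate(script) if c == '`']
def pvTicks (cs : List Char) : List Int :=
  ((PySem.List.enumerate cs).filter (fun pc => pc.2 == '`')).map (·.1)

-- found = set(); for ai, ta in enumerate(ticks): for tb in ticks[ai+1:]: found.update(index.get(script[ta:tb+1], ()))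
def pvFound (idx : PySem.Dict (List Char) (List Int)) (cs : List Char) : PySem.Set Int :=
  (PySem.List.enumerate (pvTicks cs)).foldl
    (fun f at_ =>
      (PySem.List.slice (pvTicks cs) (some (at_.1 + 1)) none).foldl
        (fun f tb => PySem.Set.update f (idx.getD (PySem.List.slice cs (some at_.2) (some (tb + 1))) []))
        f)
    PySem.Set.empty

def get_script_dependencies_alt (schema_script_names : List String) (schema_scripts : List String) : List (List Int) :=
  let idx := pvIndex schema_script_names
  (PySem.List.enumerate schema_scripts).map (fun is =>
    PySem.List.sorted ((pvFound idx is.2.toList).filter (fun j => j != is.1)) (fun x => x) false)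

-- ===== PRECONDITION & SPEC =====
def Spec_get_script_dependencies (schema_script_names : List String) (schema_scripts : List String) (out : List (List Int)) : Prop := out = get_script_dependencies_alt schema_script_names schema_scripts
instance (schema_script_names : List String) (schema_scripts : List String) (out : List (List Int)) : Decidable (Spec_get_script_dependencies schema_script_names schema_scripts out) := by unfold Spec_get_script_dependencies; infer_instance

-- ===== CLAIM (what is proved, stated in full; the proofs are below) =====
def Claim_equal_get_script_dependencies : Prop := ∀ (schema_script_names : List String) (schema_scripts : List String), Dom_get_script_dependencies schema_script_names schema_scripts → Spec_get_script_dependencies schema_script_names schema_scripts (get_script_dependencies schema_script_names schema_scripts)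

-- ===== LEMMAS AND PROOFS =====

-- membership / distinctness through B's nested update-loop building a set
theorem pv_mem_foldl_update {β γ : Type} [BEq γ] [LawfulBEq γ]
    (g : β → List γ) (l : List β) (s : PySem.Set γ) (y : γ) :
    (y ∈ l.foldl (fun f b => PySem.Set.update f (g b)) s) ↔ y ∈ s ∨ ∃ b ∈ l, y ∈ g b := by
  induction l generalizing s with
  | nil => simp
  | cons b l ih => simp [ih, PySem.Set.mem_update, or_assoc]

theorem pv_mem_foldl_foldl_update {α β γ : Type} [BEq γ] [LawfulBEq γ]
    (h : α → List β) (g : α → β → List γ) (l : List α) (s : PySem.Set γ) (y : γ) :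
    (y ∈ l.foldl (fun f a => (h a).foldl (fun f b => PySem.Set.update f (g a b)) f) s) ↔
      y ∈ s ∨ ∃ a ∈ l, ∃ b ∈ h a, y ∈ g a b := by
  induction l generalizing s with
  | nil => simp
  | cons a l ih => simp [ih, pv_mem_foldl_update, or_assoc]

theorem pv_nodup_foldl_update {β γ : Type} [BEq γ] [LawfulBEq γ]
    (g : β → List γ) (l : List β) (s : PySem.Set γ) (hs : s.Nodup) :
    (l.foldl (fun f b => PySem.Set.update f (g b)) s).Nodup := by
  induction l generalizing s with
  | nil => exact hs
  | cons b l ih => exact ih _ (PySem.Set.nodup_update _ _ hs)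

theorem pv_nodup_foldl_foldl_update {α β γ : Type} [BEq γ] [LawfulBEq γ]
    (h : α → List β) (g : α → β → List γ) (l : List α) (s : PySem.Set γ) (hs : s.Nodup) :
    (l.foldl (fun f a => (h a).foldl (fun f b => PySem.Set.update f (g a b)) f) s).Nodup := by
  induction l generalizing s with
  | nil => exact hs
  | cons a l ih => exact ih _ (pv_nodup_foldl_update _ _ _ hs)

-- the pattern always has the shape '`' ++ inner ++ '`'
theorem pvPat_shape (name : String) : ∃ x, (pvPat name).toList = '`' :: (x ++ ['`']) :=
  ⟨(((PySem.Str.split? name ".").getD []).headD "").toList, by simp [pvPat]⟩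

-- index lookup = ascending name indices whose pattern equals the key
theorem pv_idx_getD (names : List String) (p : List Char) :
    (pvIndex names).getD p [] =
      (((PySem.List.enumerate names).filter (fun jn => (pvPat jn.2).toList == p)).map (fun jn => jn.1)) := by
  unfold pvIndex
  rw [show ((PySem.List.enumerate names).foldl
      (fun d jn => d.modify (pvPat jn.2).toList [] (· ++ [jn.1])) PySem.Dict.empty)
    = (((PySem.List.enumerate names).map (fun jn => ((pvPat jn.2).toList, jn.1))).foldl
      (fun d q => d.modify q.1 [] (· ++ [q.2])) PySem.Dict.empty) from
      (List.foldl_map (f := fun (jn : Int × String) => ((pvPat jn.2).toList, jn.1))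
        (g := fun (d : PySem.Dict (List Char) (List Int)) q => d.modify q.1 [] (· ++ [q.2]))).symm]
  rw [PySem.Dict.getD_foldl_modify_append]
  simp [List.filter_map, Function.comp_def]

theorem pv_mem_idx (names : List String) (p : List Char) (j : Int) :
    j ∈ (pvIndex names).getD p [] ↔
      ∃ (k : Nat) (hk : k < names.length), j = (k : Int) ∧ (pvPat names[k]).toList = p := by
  rw [pv_idx_getD]
  simp only [List.mem_map, List.mem_filter, PySem.List.mem_enumerate_iff]
  constructor
  · rintro ⟨jn, ⟨⟨k, hk, rfl⟩, hp⟩, rfl⟩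
    exact ⟨k, hk, by simp, by simpa using hp⟩
  · rintro ⟨k, hk, rfl, hp⟩
    exact ⟨((k : Int), names[k]), ⟨⟨k, hk, by simp⟩, by simpa using hp⟩, rfl⟩

theorem pv_mem_ticks (cs : List Char) (t : Int) :
    t ∈ pvTicks cs ↔ ∃ (k : Nat) (hk : k < cs.length), t = (k : Int) ∧ cs[k] = '`' := by
  unfold pvTicks
  simp only [List.mem_map, List.mem_filter, PySem.List.mem_enumerate_iff]
  constructor
  · rintro ⟨pc, ⟨⟨k, hk, rfl⟩, hc⟩, rfl⟩
    exact ⟨k, hk, by simp, by simpa using hc⟩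
  · rintro ⟨k, hk, rfl, hc⟩
    exact ⟨((k : Int), cs[k]), ⟨⟨k, hk, by simp⟩, by simpa using hc⟩, rfl⟩

theorem pv_ticks_pairwise (cs : List Char) : (pvTicks cs).Pairwise (· < ·) := by
  unfold pvTicks
  exact List.Pairwise.map _ (fun a b h => h) ((PySem.List.pairwise_lt_enumerate cs 0).filter _)

-- crux: the candidate backtick-delimited substrings of cs are exactly its backtick-framed infixes
theorem pv_cand_iff_infix (cs : List Char) (x : List Char) :
    (∃ at_ ∈ PySem.List.enumerate (pvTicks cs),
      ∃ tb ∈ PySem.List.slice (pvTicks cs) (some (at_.1 + 1)) none,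
        PySem.List.slice cs (some at_.2) (some (tb + 1)) = '`' :: (x ++ ['`'])) ↔
      ('`' :: (x ++ ['`'])) <:+: cs := by
  constructor
  · rintro ⟨at_, hat, tb, htb, heq⟩
    have hta : at_.2 ∈ pvTicks cs := by
      rcases (PySem.List.mem_enumerate_iff _ _ _).mp hat with ⟨k, hk, rfl⟩
      simp [List.getElem_mem]
    rcases (pv_mem_ticks cs _).mp hta with ⟨a, ha, ha2, -⟩
    have htb' : tb ∈ pvTicks cs := PySem.List.mem_of_mem_slice _ _ _ htb
    rcases (pv_mem_ticks cs _).mp htb' with ⟨m, hm, rfl, -⟩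
    rw [ha2] at heq
    rw [show ((m : Int) + 1) = ((m + 1 : Nat) : Int) by push_cast; ring,
        PySem.List.slice_natCast] at heq
    rw [← heq]
    exact (List.take_prefix _ _).isInfix.trans (List.drop_suffix _ _).isInfix
  · rintro ⟨u, v, hcs⟩
    have hdrop : cs.drop u.length = ('`' :: (x ++ ['`'])) ++ v := by
      rw [← hcs]; simp [List.drop_left']
    have hlen : u.length + (x.length + 1) < cs.length := by
      rw [← hcs]; simp
    have hlena : u.length < cs.length := by omega
    have hgeta : cs[u.length] = '`' := by
      have h0 : (cs.drop u.length)[0]'(by simp [hdrop]) = '`' := by simp [hdrop]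
      rw [List.getElem_drop] at h0
      simpa using h0
    have hgetb : cs[u.length + (x.length + 1)] = '`' := by
      have h0 : (cs.drop u.length)[x.length + 1]'(by simp [hdrop]) = '`' := by
        simp only [hdrop]
        rw [List.getElem_append_left (by simp)]
        simp
      rw [List.getElem_drop] at h0
      exact h0
    have hticka : ((u.length : Int)) ∈ pvTicks cs :=
      (pv_mem_ticks cs _).mpr ⟨u.length, hlena, rfl, hgeta⟩
    have htickb : ((u.length + (x.length + 1) : Nat) : Int) ∈ pvTicks cs :=
      (pv_mem_ticks cs _).mpr ⟨_, hlen, rfl, hgetb⟩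
    rcases List.mem_iff_getElem.mp hticka with ⟨ai, hai, hgai⟩
    rcases List.mem_iff_getElem.mp htickb with ⟨bi, hbi, hgbi⟩
    have hmono := List.pairwise_iff_getElem.mp (pv_ticks_pairwise cs)
    have haib : ai < bi := by
      rcases Nat.lt_trichotomy ai bi with h | h | h
      · exact h
      · subst h
        have := hgai.symm.trans hgbi
        omega
      · have hlt := hmono bi ai hbi hai h
        rw [hgai, hgbi] at hlt
        omega
    refine ⟨((ai : Int), (u.length : Int)), ?_, ((u.length + (x.length + 1) : Nat) : Int), ?_, ?_⟩
    · exact (PySem.List.mem_enumerate_iff _ _ _).mpr ⟨ai, hai, by simp [hgai]⟩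
    · rw [show ((ai : Int) + 1) = ((ai + 1 : Nat) : Int) by push_cast; ring,
          PySem.List.slice_from_natCast]
      rw [List.mem_iff_getElem]
      refine ⟨bi - (ai + 1), by simp; omega, ?_⟩
      have he : (pvTicks cs)[ai + 1 + (bi - (ai + 1))]'(by omega) = (pvTicks cs)[bi]'hbi := by
        congr 1; omega
      rw [List.getElem_drop, he, hgbi]
    · rw [show (((u.length + (x.length + 1) : Nat) : Int) + 1) = ((u.length + (x.length + 2) : Nat) : Int) by push_cast; ring,
          PySem.List.slice_natCast]
      rw [hdrop]
      have h2 : u.length + (x.length + 2) - u.length = ('`' :: (x ++ ['`'])).length := by simp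
      rw [h2, List.take_left']
      rfl

-- j is found by B's candidate scan of cs iff j's pattern is an infix of cs
theorem pv_mem_found (names : List String) (cs : List Char) (j : Int) :
    j ∈ pvFound (pvIndex names) cs ↔
      ∃ (k : Nat) (hk : k < names.length), j = (k : Int) ∧ (pvPat names[k]).toList <:+: cs := by
  unfold pvFound
  rw [pv_mem_foldl_foldl_update]
  simp only [PySem.Set.empty, List.not_mem_nil, false_or, pv_mem_idx]
  constructor
  · rintro ⟨at_, hat, tb, htb, k, hk, rfl, hp⟩
    refine ⟨k, hk, rfl, ?_⟩
    rcases pvPat_shape names[k] with ⟨x, hx⟩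
    rw [hx]
    exact (pv_cand_iff_infix cs x).mp ⟨at_, hat, tb, htb, by rw [← hp]; exact hx⟩
  · rintro ⟨k, hk, rfl, hinf⟩
    rcases pvPat_shape names[k] with ⟨x, hx⟩
    rw [hx] at hinf
    rcases (pv_cand_iff_infix cs x).mpr hinf with ⟨at_, hat, tb, htb, heq⟩
    exact ⟨at_, hat, tb, htb, k, hk, rfl, by rw [hx, heq]⟩

-- one output row of B equals the corresponding row of A
theorem pv_row_eq (names : List String) (i : Int) (s : String) :
    PySem.List.sorted ((pvFound (pvIndex names) s.toList).filter (fun j => j != i)) (fun x => x) false =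
      ((PySem.List.enumerate names).filter (fun jn =>
        PySem.Str.isIn (pvPat jn.2) s && i != jn.1)).map (fun jn => jn.1) := by
  have hnodupB : ((pvFound (pvIndex names) s.toList).filter (fun j => j != i)).Nodup :=
    List.Nodup.filter _ (pv_nodup_foldl_foldl_update _ _ _ _ List.nodup_nil)
  have hpwA : (((PySem.List.enumerate names).filter (fun jn =>
      PySem.Str.isIn (pvPat jn.2) s && i != jn.1)).map (fun jn => jn.1)).Pairwise (· < ·) :=
    List.Pairwise.map _ (fun a b h => h) ((PySem.List.pairwise_lt_enumerate names 0).filter _)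
  have hnodupA : (((PySem.List.enumerate names).filter (fun jn =>
      PySem.Str.isIn (pvPat jn.2) s && i != jn.1)).map (fun jn => jn.1)).Nodup :=
    hpwA.imp (fun h => ne_of_lt h)
  refine PySem.List.sorted_eq_of_perm_of_pairwise_lt _ _ _ ?_ hpwA
  rw [List.perm_ext_iff_of_nodup hnodupA hnodupB]
  intro j
  constructor
  · intro hj
    rw [List.mem_map] at hj
    obtain ⟨jn, hjn, hj1⟩ := hj
    rw [List.mem_filter] at hjn
    obtain ⟨hen, hp⟩ := hjn
    obtain ⟨k, hk, hjneq⟩ := (PySem.List.mem_enumerate_iff _ _ _).mp hen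
    subst hjneq
    subst hj1
    simp only [Bool.and_eq_true, bne_iff_ne] at hp
    rw [List.mem_filter, pv_mem_found]
    refine ⟨⟨k, hk, by simp, (PySem.Str.isIn_iff_infix _ _).mp hp.1⟩, ?_⟩
    rw [bne_iff_ne]
    exact (hp.2).symm
  · intro hj
    rw [List.mem_filter, pv_mem_found] at hj
    obtain ⟨⟨k, hk, hjk, hinf⟩, hne⟩ := hj
    rw [List.mem_map]
    refine ⟨((0 : Int) + (k : Int), names[k]), ?_, by simpa using hjk.symm⟩
    rw [List.mem_filter]
    refine ⟨(PySem.List.mem_enumerate_iff _ _ _).mpr ⟨k, hk, rfl⟩, ?_⟩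
    simp only [Bool.and_eq_true, bne_iff_ne]
    exact ⟨(PySem.Str.isIn_iff_infix _ _).mpr hinf, fun h => (bne_iff_ne.mp hne) (by omega)⟩

-- ===== VERDICT (by name: the statement is the Claim_ definition above) =====
theorem get_script_dependencies_spec : Claim_equal_get_script_dependencies := by
  intro names scripts _
  unfold Spec_get_script_dependencies get_script_dependencies get_script_dependencies_alt
  simp only
  apply List.map_congr_left
  intro is _
  exact (pv_row_eq names is.1 is.2).symm
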